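-- pv_equiv track=rewrite | github.com/dcord1x/Artemis | backend/nlp_analysis.py | _negation_near_phrase
-- ===== SOURCE A (Python) =====
-- def _negation_near_phrase(text: str, phrase: str, window: int = 40) -> bool:
--     """
--     Return True if a negation word appears within `window` chars before the phrase.
--     Simple proximity check (no full parse needed for phrase-level negation).
--     """
--     negations = ["not ", "never ", "didn't ", "don't ", "doesn't ",
--                  "without ", "no ", "wasn't ", "weren't "]
--     low = text.lower()
--     idx = low.find(phrase)
--     if idx == -1:
--         return False
--     prefix = low[max(0, idx - window): idx]
--     return any(neg in prefix for neg in negations)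
-- ===== SOURCE B (Python) =====
-- def _negation_near_phrase(text: str, phrase: str, window: int = 40) -> bool:
--     """Position-scan: walk the window once and test each offset for a negation
--     start, instead of one substring search per negation over a sliced prefix."""
--     negations = ("not ", "never ", "didn't ", "don't ", "doesn't ",
--                  "without ", "no ", "wasn't ", "weren't ")
--     low = text.lower()
--     idx = low.find(phrase)
--     if idx == -1:
--         return False
--     start = max(0, idx - window)
--     return any(low.startswith(neg, i, idx)
--                for i in range(start, idx) for neg in negations)
-- ===== Notes on version B (the rewrite author's own statement) =====
-- stated objective: alternative
-- what changed: Replaces the pattern-major scan (one substring search per negation over a sliced prefix) by a position-major single walk over the window that tests each offset with a bounded startswith, building no prefix slice.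
import Mathlib
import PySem

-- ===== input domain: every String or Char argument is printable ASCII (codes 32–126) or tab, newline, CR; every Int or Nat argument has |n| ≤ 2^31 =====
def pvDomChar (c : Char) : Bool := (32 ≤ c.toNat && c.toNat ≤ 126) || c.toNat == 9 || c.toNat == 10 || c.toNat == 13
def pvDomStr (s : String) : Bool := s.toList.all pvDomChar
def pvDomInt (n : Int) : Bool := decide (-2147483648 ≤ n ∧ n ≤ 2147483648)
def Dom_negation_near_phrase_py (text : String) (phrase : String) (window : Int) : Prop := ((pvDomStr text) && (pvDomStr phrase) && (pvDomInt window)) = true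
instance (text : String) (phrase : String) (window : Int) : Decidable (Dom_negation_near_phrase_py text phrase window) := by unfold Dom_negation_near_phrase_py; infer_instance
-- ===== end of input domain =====

-- B scans the window positions once, testing each offset for a negation start,
-- instead of one substring search per negation over a sliced prefix (objective: alternative).

def pvNegations : List String :=
  ["not ", "never ", "didn't ", "don't ", "doesn't ",
   "without ", "no ", "wasn't ", "weren't "]

-- ===== PORT A =====
def negation_near_phrase_py (text : String) (phrase : String) (window : Int) : Bool :=
  let low := PySem.Str.lower text
  let idx := PySem.Str.find low phrase
  if idx == -1 then false
  else
    let pre := PySem.Str.slice low (some (max 0 (idx - window))) (some idx)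
    pvNegations.any (fun neg => PySem.Str.isIn neg pre)

-- ===== PORT B =====
-- hand port of s.startswith(p, i, e); exact for 0 ≤ i and 0 ≤ e ≤ len s (the only way B calls it)
def pvStartswithAt (s p : List Char) (i e : Int) : Bool :=
  decide (i + p.length ≤ e) && p.isPrefixOf (s.drop i.toNat)

def negation_near_phrase_py_alt (text : String) (phrase : String) (window : Int) : Bool :=
  let low := PySem.Str.lower text
  let idx := PySem.Str.find low phrase
  if idx == -1 then false
  else
    let start := max 0 (idx - window)
    (PySem.List.pyRange start idx 1).any (fun i =>
      pvNegations.any (fun neg => pvStartswithAt low.toList neg.toList i idx))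

-- ===== PRECONDITION & SPEC =====
def Spec_negation_near_phrase_py (text : String) (phrase : String) (window : Int) (out : Bool) : Prop := out = negation_near_phrase_py_alt text phrase window
instance (text : String) (phrase : String) (window : Int) (out : Bool) : Decidable (Spec_negation_near_phrase_py text phrase window out) := by unfold Spec_negation_near_phrase_py; infer_instance

-- ===== CLAIM (what is proved, stated in full; the proofs are below) =====
def Claim_equal_negation_near_phrase_py : Prop := ∀ (text : String) (phrase : String) (window : Int), Dom_negation_near_phrase_py text phrase window → Spec_negation_near_phrase_py text phrase window (negation_near_phrase_py text phrase window)

-- ===== LEMMAS AND PROOFS =====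

-- Core correspondence for one nonempty pattern: 'neg in L[s0 : n]' holds
-- iff neg matches at some absolute position i with s0 ≤ i < n and i + |neg| ≤ n.
theorem pv_isIn_slice_iff (L neg : List Char) (s0 n : Nat)
    (hne : neg ≠ []) :
    PySem.Chars.isIn neg ((L.drop s0).take (n - s0)) = true ↔
      ∃ i : Nat, s0 ≤ i ∧ i < n ∧ i + neg.length ≤ n ∧ neg <+: L.drop i := by
  rw [← PySem.Chars.exists_prefix_drop_iff_isIn]
  constructor
  · rintro ⟨j, hj⟩
    rw [List.drop_take, List.drop_drop] at hj
    rw [List.prefix_take_iff] at hj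
    obtain ⟨hpre, hlen⟩ := hj
    have hlen1 : 1 ≤ neg.length := List.length_pos_iff.mpr hne
    refine ⟨s0 + j, by omega, by omega, by omega, by
      simpa [Nat.add_comm s0 j] using hpre⟩
  · rintro ⟨i, hi1, hi2, hi3, hpre⟩
    refine ⟨i - s0, ?_⟩
    rw [List.drop_take, List.drop_drop, List.prefix_take_iff]
    constructor
    · have h' : s0 + (i - s0) = i := by omega
      rw [h']; exact hpre
    · omega

theorem pv_negs_ne_nil : ∀ neg ∈ pvNegations, neg.toList ≠ [] := by decide

-- ===== VERDICT (by name: the statement is the Claim_ definition above) =====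
theorem negation_near_phrase_py_spec : Claim_equal_negation_near_phrase_py := by
  intro text phrase window _
  unfold Spec_negation_near_phrase_py negation_near_phrase_py negation_near_phrase_py_alt
  simp only []
  set low := PySem.Str.lower text with hlow
  set idx := PySem.Str.find low phrase with hidx
  by_cases h : idx = -1
  · simp [h]
  · have hge : 0 ≤ idx := by
      have := PySem.Chars.neg_one_le_find low.toList phrase.toList
      simp only [hidx, PySem.Str.find_eq] at *
      omega
    simp only [beq_iff_eq, h, if_false]
    rw [Bool.eq_iff_iff]
    have hs0 : (0 : Int) ≤ max 0 (idx - window) := le_max_left _ _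
    -- rewrite A's slice to drop/take on lists
    have hslice : (PySem.Str.slice low (some (max 0 (idx - window))) (some idx)).toList
        = (low.toList.drop (max 0 (idx - window)).toNat).take (idx.toNat - (max 0 (idx - window)).toNat) := by
      simp [PySem.Str.slice]
      rw [PySem.List.slice_toNat _ hs0 hge]
    simp only [List.any_eq_true]
    constructor
    · rintro ⟨neg, hneg, hin⟩
      rw [PySem.Str.isIn_eq, hslice] at hin
      have := (pv_isIn_slice_iff low.toList neg.toList (max 0 (idx - window)).toNat idx.toNat
        (pv_negs_ne_nil neg hneg)).mp hin
      obtain ⟨i, hi1, hi2, hi3, hpre⟩ := this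
      refine ⟨(i : Int), ?_, neg, hneg, ?_⟩
      · rw [PySem.List.mem_pyRange_one]; omega
      · have hi3' : (i : Int) + neg.toList.length ≤ idx := by omega
        unfold pvStartswithAt
        simp only [Bool.and_eq_true, decide_eq_true_eq, List.isPrefixOf_iff_prefix]
        exact ⟨by simpa using hi3', hpre⟩
    · rintro ⟨i, hi, neg, hneg, hsw⟩
      rw [PySem.List.mem_pyRange_one] at hi
      unfold pvStartswithAt at hsw
      simp only [Bool.and_eq_true, decide_eq_true_eq, List.isPrefixOf_iff_prefix] at hsw
      obtain ⟨hfit, hpre⟩ := hsw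
      refine ⟨neg, hneg, ?_⟩
      rw [PySem.Str.isIn_eq, hslice]
      have hne := pv_negs_ne_nil neg hneg
      have hlen1 : 1 ≤ neg.toList.length := List.length_pos_iff.mpr hne
      refine (pv_isIn_slice_iff low.toList neg.toList (max 0 (idx - window)).toNat idx.toNat
        hne).mpr ⟨i.toNat, by omega, by omega, by omega, ?_⟩
      have : (i.toNat : Int) = i := by omega
      simpa using hpre
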